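-- pv_equiv track=rewrite | github.com/effa/flocs-thesis | analysis/features.py | get_token_counts
-- ===== SOURCE A (Python) =====
-- from collections import Counter, OrderedDict, defaultdict
--
-- def get_token_counts(solution):
--     # caveat: 'r' can be either 'right' or 'red' depending on the context
--     nesting = 0
--     test = False
--     counts = defaultdict(int)
--     counts = OrderedDict([
--         (token, 0)
--         for token in ['shoot', 'repeat', 'while', 'if', 'else',
--                       'col', 'pos', 'nest']
--     ])
--     for token in solution:
--         if token == '{':
--             nesting += 1
--             counts['nest'] = max(nesting, counts['nest'])
--             test = False
--             continue
--         if token == '}':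
--             nesting -= 1
--             continue
--         if token == 'W':
--             counts['while'] += 1
--         if token == 'I':
--             counts['if'] += 1
--         if token == 'R':
--             counts['repeat'] += 1
--         if token == 's':
--             counts['shoot'] += 1
--         if token == '/':
--             counts['else'] += 1
--         if test and token in 'yrgbk':
--             counts['col'] += 1
--         if test and token == 'x':
--             counts['pos'] += 1
--         if token in 'WI':
--             test = True
--     return counts
-- ===== SOURCE B (Python) =====
-- from collections import Counter, OrderedDict
--
-- def get_token_counts(solution):
--     tally = Counter(solution)
--     depth = 0
--     nest = 0
--     for token in solution:
--         if token == '{':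
--             depth += 1
--             if nest < depth:
--                 nest = depth
--         elif token == '}':
--             depth -= 1
--     test = False
--     col = 0
--     pos = 0
--     for token in solution:
--         if token == '{':
--             test = False
--         elif token != '}':
--             if test and token in 'yrgbk':
--                 col += 1
--             if test and token == 'x':
--                 pos += 1
--             if token in 'WI':
--                 test = True
--     return OrderedDict([
--         ('shoot', tally['s']),
--         ('repeat', tally['R']),
--         ('while', tally['W']),
--         ('if', tally['I']),
--         ('else', tally['/']),
--         ('col', col),
--         ('pos', pos),
--         ('nest', nest),
--     ])
-- ===== Notes on version B (the rewrite author's own statement) =====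
-- stated objective: alternative
-- what changed: B replaces A's single loop that mutates one OrderedDict with independent passes: a Counter for the five exact-token tallies, a brace-depth scan for 'nest', and a dedicated test-flag scan for 'col'/'pos', assembled into the dict at the end.
import Mathlib
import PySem

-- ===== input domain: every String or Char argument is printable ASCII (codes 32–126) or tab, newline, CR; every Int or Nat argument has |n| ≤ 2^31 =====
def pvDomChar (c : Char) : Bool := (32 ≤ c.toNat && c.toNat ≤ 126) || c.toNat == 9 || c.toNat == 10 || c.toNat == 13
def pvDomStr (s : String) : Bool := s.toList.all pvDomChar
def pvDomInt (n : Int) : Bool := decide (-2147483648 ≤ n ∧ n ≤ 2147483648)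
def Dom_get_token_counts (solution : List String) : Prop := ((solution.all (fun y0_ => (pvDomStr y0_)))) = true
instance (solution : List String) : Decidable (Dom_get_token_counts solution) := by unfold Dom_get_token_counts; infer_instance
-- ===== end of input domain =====

-- B decomposes A's single dict-mutating loop into a Counter plus two dedicated scans (nest depth; test/col/pos); same results, same O(n) cost (objective: alternative).

-- ===== PORT A =====
-- A's loop body: state = (nesting, test, counts)
def pvAStep (st : Int × Bool × PySem.Dict String Int) (token : String) : Int × Bool × PySem.Dict String Int :=
  let (nesting, test, counts) := st
  if token == "{" then
    let nesting := nesting + 1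
    (nesting, false, counts.insert "nest" (max nesting (counts.getD "nest" 0)))
  else if token == "}" then
    (nesting - 1, test, counts)
  else
    let counts := if token == "W" then counts.modify "while" 0 (· + 1) else counts
    let counts := if token == "I" then counts.modify "if" 0 (· + 1) else counts
    let counts := if token == "R" then counts.modify "repeat" 0 (· + 1) else counts
    let counts := if token == "s" then counts.modify "shoot" 0 (· + 1) else counts
    let counts := if token == "/" then counts.modify "else" 0 (· + 1) else counts
    let counts := if test && PySem.Str.isIn token "yrgbk" then counts.modify "col" 0 (· + 1) else counts
    let counts := if test && (token == "x") then counts.modify "pos" 0 (· + 1) else counts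
    let test := if PySem.Str.isIn token "WI" then true else test
    (nesting, test, counts)

def get_token_counts (solution : List String) : List (String × Int) :=
  let counts : PySem.Dict String Int :=
    PySem.Dict.mk [("shoot", 0), ("repeat", 0), ("while", 0), ("if", 0), ("else", 0),
                   ("col", 0), ("pos", 0), ("nest", 0)]
  (solution.foldl pvAStep (0, false, counts)).2.2.items

-- ===== PORT B =====
-- B's nest scan: state = (depth, nest)
def pvNestStep (st : Int × Int) (token : String) : Int × Int :=
  if token == "{" then
    let d := st.1 + 1
    (d, if st.2 < d then d else st.2)
  else if token == "}" then (st.1 - 1, st.2)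
  else st

-- B's test/col/pos scan: state = (test, col, pos)
def pvTestStep (st : Bool × Int × Int) (token : String) : Bool × Int × Int :=
  if token == "{" then (false, st.2)
  else if token == "}" then st
  else
    let col := if st.1 && PySem.Str.isIn token "yrgbk" then st.2.1 + 1 else st.2.1
    let pos := if st.1 && (token == "x") then st.2.2 + 1 else st.2.2
    let test := if PySem.Str.isIn token "WI" then true else st.1
    (test, col, pos)

def get_token_counts_alt (solution : List String) : List (String × Int) :=
  let tally := PySem.Dict.counter solution
  let nest := (solution.foldl pvNestStep (0, 0)).2
  let tc := solution.foldl pvTestStep (false, 0, 0)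
  [("shoot", tally.getD "s" 0), ("repeat", tally.getD "R" 0), ("while", tally.getD "W" 0),
   ("if", tally.getD "I" 0), ("else", tally.getD "/" 0),
   ("col", tc.2.1), ("pos", tc.2.2), ("nest", nest)]

-- ===== PRECONDITION & SPEC =====
def Spec_get_token_counts (solution : List String) (out : List (String × Int)) : Prop := out = get_token_counts_alt solution
instance (solution : List String) (out : List (String × Int)) : Decidable (Spec_get_token_counts solution out) := by unfold Spec_get_token_counts; infer_instance

-- ===== CLAIM (what is proved, stated in full; the proofs are below) =====
def Claim_equal_get_token_counts : Prop := ∀ (solution : List String), Dom_get_token_counts solution → Spec_get_token_counts solution (get_token_counts solution)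

-- ===== LEMMAS AND PROOFS =====
def pvD8 (cs cr cw ci ce col pos nest : Int) : PySem.Dict String Int :=
  PySem.Dict.mk [("shoot", cs), ("repeat", cr), ("while", cw), ("if", ci), ("else", ce),
                 ("col", col), ("pos", pos), ("nest", nest)]

set_option maxHeartbeats 2000000 in
theorem pv_step_gen (t : String) (h1 : (t == "{") = false) (h2 : (t == "}") = false)
    (ns : Int) (test : Bool) (cs cr cw ci ce col pos nest : Int) :
    pvAStep (ns, test, pvD8 cs cr cw ci ce col pos nest) t =
      (ns, (if PySem.Str.isIn t "WI" then true else test),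
       pvD8 (cs + if t == "s" then 1 else 0) (cr + if t == "R" then 1 else 0)
            (cw + if t == "W" then 1 else 0) (ci + if t == "I" then 1 else 0)
            (ce + if t == "/" then 1 else 0)
            (col + if test && PySem.Str.isIn t "yrgbk" then 1 else 0)
            (pos + if test && (t == "x") then 1 else 0) nest) := by
  simp only [pvAStep, h1, h2, Bool.false_eq_true, if_false]
  split_ifs <;>
    simp_all [pvD8, PySem.Dict.modify, PySem.Dict.insert, PySem.Dict.getD, PySem.Dict.get?]

theorem pv_main (l : List String) (ns : Int) (test : Bool) (cs cr cw ci ce col pos nest : Int) :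
    l.foldl pvAStep (ns, test, pvD8 cs cr cw ci ce col pos nest) =
      ((l.foldl pvNestStep (ns, nest)).1,
       (l.foldl pvTestStep (test, col, pos)).1,
       pvD8 (cs + l.count "s") (cr + l.count "R") (cw + l.count "W") (ci + l.count "I")
            (ce + l.count "/")
            (l.foldl pvTestStep (test, col, pos)).2.1
            (l.foldl pvTestStep (test, col, pos)).2.2
            (l.foldl pvNestStep (ns, nest)).2) := by
  induction l generalizing ns test cs cr cw ci ce col pos nest with
  | nil => simp
  | cons t l ih =>
    simp only [List.foldl_cons]
    by_cases h1 : t = "{"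
    · subst h1
      have hb : pvAStep (ns, test, pvD8 cs cr cw ci ce col pos nest) "{" =
          (ns + 1, false, pvD8 cs cr cw ci ce col pos (max (ns + 1) nest)) := by
        simp [pvAStep, pvD8, PySem.Dict.insert, PySem.Dict.getD, PySem.Dict.get?]
      rw [hb, ih]
      have hm : max (ns + 1) nest = if nest < ns + 1 then ns + 1 else nest := by
        split <;> omega
      simp [pvNestStep, pvTestStep, hm]
    · by_cases h2 : t = "}"
      · subst h2
        have hb : pvAStep (ns, test, pvD8 cs cr cw ci ce col pos nest) "}" =
            (ns - 1, test, pvD8 cs cr cw ci ce col pos nest) := by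
          simp [pvAStep]
        rw [hb, ih]
        simp [pvNestStep, pvTestStep]
      · rw [pv_step_gen t (by simp [h1]) (by simp [h2]), ih]
        have hn : pvNestStep (ns, nest) t = (ns, nest) := by
          simp [pvNestStep, h1, h2]
        have ht : pvTestStep (test, col, pos) t =
            ((if PySem.Str.isIn t "WI" then true else test),
             (col + if test && PySem.Str.isIn t "yrgbk" then 1 else 0),
             (pos + if test && (t == "x") then 1 else 0)) := by
          simp [pvTestStep, h1, h2]
          split_ifs <;> simp_all
        rw [hn, ht]
        simp only [List.count_cons]
        push_cast
        simp only [pvD8, Prod.mk.injEq, PySem.Dict.mk.injEq, List.cons.injEq]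
        and_intros <;> first | trivial | ring

-- ===== VERDICT (by name: the statement is the Claim_ definition above) =====
theorem get_token_counts_spec : Claim_equal_get_token_counts := by
  intro solution _
  unfold Spec_get_token_counts get_token_counts get_token_counts_alt
  show (solution.foldl pvAStep (0, false, pvD8 0 0 0 0 0 0 0 0)).2.2.items = _
  rw [pv_main]
  simp [pvD8, PySem.Dict.getD_counter]
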